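-- pv_equiv track=rewrite | github.com/SurAgrawal/Dissertation | Models/experiment_runner.py | compute_param_count
-- ===== SOURCE A (Python) =====
-- def compute_param_count(m: int, width: int, depth: int, in_dim: int = 1) -> int:
--     """Compute the number of trainable parameters of the DeepONet model.
--
--     The architecture comprises a branch MLP taking ``m`` sensor values to
--     ``feat_dim`` outputs and a trunk MLP taking coordinates of size
--     ``in_dim`` to ``feat_dim`` outputs.  Each MLP has ``depth`` total
--     layers: ``depth-1`` hidden layers of size ``width`` followed by the
--     final output layer.  Both bias and weight parameters are counted.
--
--     Parameters
--     ----------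
--     m : int
--         Number of sensor points (input dimension to the branch).
--     width : int
--         Width of the hidden layers.
--     depth : int
--         Total number of layers in each MLP (including final output layer).
--     feat_dim : int
--         Output feature dimension of each MLP.
--     in_dim : int
--         Dimensionality of the coordinate input to the trunk (1 for ODE).
--
--     Returns
--     -------
--     int
--         Total number of trainable parameters.
--     """
--     # Hidden layer sizes: depth-1 hidden layers all of size width
--     hidden = [width] * (depth - 1)
--     branch_sizes = [m] + hidden + [50]
--     trunk_sizes = [in_dim] + hidden + [50]
--     param_count = 0
--     # Branch MLP parameters
--     for in_d, out_d in zip(branch_sizes[:-1], branch_sizes[1:]):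
--         param_count += in_d * out_d + out_d  # weights + biases
--     # Trunk MLP parameters
--     for in_d, out_d in zip(trunk_sizes[:-1], trunk_sizes[1:]):
--         param_count += in_d * out_d + out_d
--     return param_count
-- ===== SOURCE B (Python) =====
-- def compute_param_count(m: int, width: int, depth: int, in_dim: int = 1) -> int:
--     # Closed-form count: both MLPs share the hidden stack, so sum the two
--     # input layers, the shared hidden blocks and the two output layers directly.
--     h = max(depth - 1, 0)  # number of hidden layers actually built
--     if h == 0:
--         # No hidden layers: each MLP is a single (input -> 50) layer.
--         return (m + in_dim) * 50 + 100
--     return ((m + in_dim) * width + 2 * width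
--             + 2 * (h - 1) * (width * width + width)
--             + 2 * (50 * width + 50))
-- ===== Notes on version B (the rewrite author's own statement) =====
-- stated objective: faster
-- what changed: Replaced the list construction and the two zip-loops over layer sizes by a closed-form arithmetic expression ((depth-2) identical width^2+width hidden terms plus the fixed input and output layer terms).
import Mathlib
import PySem

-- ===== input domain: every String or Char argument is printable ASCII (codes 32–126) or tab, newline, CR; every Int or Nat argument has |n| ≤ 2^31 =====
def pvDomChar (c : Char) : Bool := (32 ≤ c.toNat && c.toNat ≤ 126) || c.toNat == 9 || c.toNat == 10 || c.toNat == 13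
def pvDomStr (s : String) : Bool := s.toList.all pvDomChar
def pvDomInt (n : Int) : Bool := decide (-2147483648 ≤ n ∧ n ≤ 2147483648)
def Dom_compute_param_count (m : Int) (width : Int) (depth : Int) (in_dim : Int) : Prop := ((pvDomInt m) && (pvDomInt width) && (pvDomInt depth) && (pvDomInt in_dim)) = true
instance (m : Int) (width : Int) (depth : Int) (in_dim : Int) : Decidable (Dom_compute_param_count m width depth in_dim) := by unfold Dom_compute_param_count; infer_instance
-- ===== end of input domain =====

-- B replaces A's list building and zip-loops by a closed-form O(1) arithmetic formula.


-- ===== PORT A =====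
-- zip(xs, ys): Python's zip; via arrays so evaluation is stack-safe (pyZip_eq below: = List.zip).
def pyZip {α β : Type} (xs : List α) (ys : List β) : List (α × β) := (xs.toArray.zip ys.toArray).toList

-- xs[:-1] = xs.dropLast and xs[1:] = xs.tail: exact for any list.
-- [width] * (depth - 1) = List.replicate (depth-1).toNat width: Python list
-- repetition by a non-positive count gives [], as does toNat of a non-positive Int.
def compute_param_count (m : Int) (width : Int) (depth : Int) (in_dim : Int) : Int :=
  let hidden : List Int := List.replicate (depth - 1).toNat width
  let branch_sizes : List Int := [m] ++ hidden ++ [50]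
  let trunk_sizes : List Int := [in_dim] ++ hidden ++ [50]
  let param_count : Int := 0
  let param_count :=
    (pyZip branch_sizes.dropLast branch_sizes.tail).foldl
      (fun acc p => acc + (p.1 * p.2 + p.2)) param_count
  let param_count :=
    (pyZip trunk_sizes.dropLast trunk_sizes.tail).foldl
      (fun acc p => acc + (p.1 * p.2 + p.2)) param_count
  param_count

-- ===== PORT B =====
def compute_param_count_alt (m : Int) (width : Int) (depth : Int) (in_dim : Int) : Int :=
  let h := max (depth - 1) 0
  if h = 0 then (m + in_dim) * 50 + 100
  else (m + in_dim) * width + 2 * width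
       + 2 * (h - 1) * (width * width + width)
       + 2 * (50 * width + 50)

-- ===== PRECONDITION & SPEC =====
def Spec_compute_param_count (m : Int) (width : Int) (depth : Int) (in_dim : Int) (out : Int) : Prop := out = compute_param_count_alt m width depth in_dim
instance (m : Int) (width : Int) (depth : Int) (in_dim : Int) (out : Int) : Decidable (Spec_compute_param_count m width depth in_dim out) := by unfold Spec_compute_param_count; infer_instance

-- ===== CLAIM (what is proved, stated in full; the proofs are below) =====
def Claim_equal_compute_param_count : Prop := ∀ (m : Int) (width : Int) (depth : Int) (in_dim : Int), Dom_compute_param_count m width depth in_dim → Spec_compute_param_count m width depth in_dim (compute_param_count m width depth in_dim)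

-- ===== LEMMAS AND PROOFS =====

theorem pyZip_eq {α β : Type} (xs : List α) (ys : List β) : pyZip xs ys = xs.zip ys := by
  simp [pyZip]

-- One MLP's pairwise sum over [s0] ++ replicate n w ++ [50], in closed form.
theorem mlp_sum (n : Nat) (w : Int) :
    ∀ (s0 acc : Int),
    ((([s0] ++ List.replicate n w ++ [50]).dropLast.zip
      (([s0] ++ List.replicate n w ++ [50]).tail)).foldl
        (fun (acc : Int) (p : Int × Int) => acc + (p.1 * p.2 + p.2)) acc)
    = acc + (if n = 0 then s0 * 50 + 50
             else s0 * w + w + ((n : Int) - 1) * (w * w + w) + 50 * w + 50) := by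
  induction n with
  | zero => intro s0 acc; simp
  | succ k ih =>
    intro s0 acc
    have e1 : ([s0] ++ List.replicate (k+1) w ++ [50]).dropLast.zip
        (([s0] ++ List.replicate (k+1) w ++ [50]).tail)
        = (s0, w) :: (([w] ++ List.replicate k w ++ [50]).dropLast.zip
            (([w] ++ List.replicate k w ++ [50]).tail)) := by
      simp [List.replicate_succ]
    rw [e1, List.foldl_cons, ih w (acc + (s0 * w + w))]
    rcases k with _ | j
    · simp; ring
    · simp only [Nat.succ_ne_zero, Nat.cast_succ]
      push_cast
      ring

-- ===== VERDICT (by name: the statement is the Claim_ definition above) =====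
theorem compute_param_count_spec : Claim_equal_compute_param_count := by
  intro m width depth in_dim _
  show _ = _
  unfold compute_param_count compute_param_count_alt
  simp only [pyZip_eq]
  rw [mlp_sum, mlp_sum]
  by_cases h : depth ≤ 1
  · have h0 : (depth - 1).toNat = 0 := by omega
    have hm : max (depth - 1) 0 = 0 := by omega
    simp [h0, hm]; ring
  · have h0 : (depth - 1).toNat ≠ 0 := by omega
    have hc : ((depth - 1).toNat : Int) = depth - 1 := by omega
    have hm : max (depth - 1) 0 = depth - 1 := by omega
    simp only [h0, hm, hc, if_false]
    have hz : ¬ (depth - 1 = 0) := by omega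
    rw [if_neg hz]
    ring
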